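-- pv_equiv track=rewrite | github.com/TNO/PQChoiceAssistant | scoring/scoring_to_json.py | choose_option
-- ===== SOURCE A (Python) =====
-- def choose_option(text, mode):
--     if not isinstance(text, str) or not text:
--         return "ntb"
--     text = text.split()
--     for idx, word in enumerate(text):
--         if "/" in word:
--             pos = word.index("/")
--             if mode == "kem":
--                 text[idx] = word[:pos]
--             elif mode == "dss":
--                 text[idx] = word[pos + 1 :]
--     return " ".join(text)
-- ===== SOURCE B (Python) =====
-- def choose_option(text, mode):
--     if not isinstance(text, str) or not text:
--         return "ntb"
--     out = []          # finished output words
--     pre = []          # chars of current word before its first '/'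
--     post = []         # chars of current word after its first '/'
--     seen = False      # a '/' was seen in the current word
--     for ch in text + " ":
--         if ch.isspace():
--             if seen:
--                 if mode == "kem":
--                     out.append("".join(pre))
--                 elif mode == "dss":
--                     out.append("".join(post))
--                 else:
--                     out.append("".join(pre) + "/" + "".join(post))
--             elif pre:
--                 out.append("".join(pre))
--             pre, post, seen = [], [], False
--         elif seen:
--             post.append(ch)
--         elif ch == "/":
--             seen = True
--         else:
--             pre.append(ch)
--     return " ".join(out)
-- ===== Notes on version B (the rewrite author's own statement) =====
-- stated objective: alternative
-- what changed: Replaces split-into-words plus per-word substring search and slicing by a single character-level state-machine pass that builds the output words incrementally (prefix/suffix buffers around the first slash, flushed at whitespace).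
import Mathlib
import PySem

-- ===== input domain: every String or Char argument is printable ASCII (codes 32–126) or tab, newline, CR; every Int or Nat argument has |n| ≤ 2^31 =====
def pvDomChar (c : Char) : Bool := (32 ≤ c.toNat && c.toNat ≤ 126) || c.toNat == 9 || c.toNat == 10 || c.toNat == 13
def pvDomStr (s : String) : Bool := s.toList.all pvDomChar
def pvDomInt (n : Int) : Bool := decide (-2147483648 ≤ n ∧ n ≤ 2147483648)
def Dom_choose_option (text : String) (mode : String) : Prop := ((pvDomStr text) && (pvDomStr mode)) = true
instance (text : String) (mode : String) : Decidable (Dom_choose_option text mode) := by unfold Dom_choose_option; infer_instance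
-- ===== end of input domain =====

-- B replaces A's split-into-words + per-word index/slice loop by a single character-level
-- state-machine pass building the output words incrementally; alternative, same cost.

-- ===== PORT A =====
def choose_option (text : String) (mode : String) : String :=
  if text = "" then "ntb"
  else
    let ws := PySem.Str.split₀ text
    let ws := (PySem.List.enumerate ws).foldl (fun acc p =>
      if PySem.Str.isIn "/" p.2 then
        let pos := PySem.Str.find p.2 "/"
        if mode = "kem" then PySem.List.pySetD acc p.1 (PySem.Str.slice p.2 none (some pos))
        else if mode = "dss" then PySem.List.pySetD acc p.1 (PySem.Str.slice p.2 (some (pos + 1)) none)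
        else acc
      else acc) ws
    PySem.Str.join " " ws

-- ===== PORT B =====
-- state of Source B's scan: finished words, chars before / after the first '/' of the
-- current word, and whether a '/' was seen in the current word
structure PvBState where
  out : List String
  pre : List Char
  post : List Char
  seen : Bool

def pvStepB (mode : String) (st : PvBState) (ch : Char) : PvBState :=
  if PySem.Chars.isspace ch then
    let st' :=
      if st.seen then
        if mode = "kem" then { st with out := st.out ++ [String.ofList st.pre] }
        else if mode = "dss" then { st with out := st.out ++ [String.ofList st.post] }
        else { st with out := st.out ++ [String.ofList st.pre ++ "/" ++ String.ofList st.post] }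
      else if st.pre ≠ [] then { st with out := st.out ++ [String.ofList st.pre] }
      else st
    { st' with pre := [], post := [], seen := false }
  else if st.seen then { st with post := st.post ++ [ch] }
  else if ch = '/' then { st with seen := true }
  else { st with pre := st.pre ++ [ch] }

def choose_option_alt (text : String) (mode : String) : String :=
  if text = "" then "ntb"
  else
    let fin := (text ++ " ").toList.foldl (pvStepB mode) ⟨[], [], [], false⟩
    PySem.Str.join " " fin.out

-- ===== PRECONDITION & SPEC =====
def Spec_choose_option (text : String) (mode : String) (out : String) : Prop := out = choose_option_alt text mode
instance (text : String) (mode : String) (out : String) : Decidable (Spec_choose_option text mode out) := by unfold Spec_choose_option; infer_instance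

-- ===== CLAIM (what is proved, stated in full; the proofs are below) =====
def Claim_equal_choose_option : Prop := ∀ (text : String) (mode : String), Dom_choose_option text mode → Spec_choose_option text mode (choose_option text mode)

-- ===== LEMMAS AND PROOFS =====

-- the per-word transformation both programs compute
def pvF (mode : String) (w : List Char) : List Char :=
  if '/' ∈ w then
    if mode = "kem" then w.takeWhile (· ≠ '/')
    else if mode = "dss" then w.drop ((w.takeWhile (· ≠ '/')).length + 1)
    else w
  else w

def pvNonWs (c : Char) : Bool := ! PySem.Chars.isspace c

-- the word list str.split() produces, as a plain recursion
def pvWords : List Char → List (List Char)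
  | [] => []
  | c :: l =>
    if PySem.Chars.isspace c then pvWords l
    else (c :: l.takeWhile pvNonWs) :: pvWords (l.dropWhile pvNonWs)
termination_by l => l.length
decreasing_by
  · simp
  · have := List.length_dropWhile_le pvNonWs l; simp; omega

-- ---------- A side: the enumerate/pySetD fold is a map ----------
def pvStepO {β : Type} (o : β → Option β) (acc : List β) (p : Int × β) : List β :=
  match o p.2 with
  | some v => PySem.List.pySetD acc p.1 v
  | none => acc

theorem pv_foldl_stepO {β : Type} (o : β → Option β) :
    ∀ (suf pre : List β),
      (PySem.List.enumerate suf (pre.length : Int)).foldl (pvStepO o) (pre ++ suf)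
        = pre ++ suf.map (fun w => (o w).getD w) := by
  intro suf
  induction suf with
  | nil => intro pre; simp [PySem.List.enumerate_nil]
  | cons w rest ih =>
    intro pre
    rw [PySem.List.enumerate_cons, List.foldl_cons]
    have hstep : pvStepO o (pre ++ w :: rest) ((pre.length : Int), w)
        = (pre ++ [(o w).getD w]) ++ rest := by
      unfold pvStepO
      cases h : o w with
      | none => simp
      | some v =>
        simp only [PySem.List.pySetD_natCast, List.set_append, Option.getD_some]
        simp
    rw [hstep]
    have hlen : ((pre.length : Int) + 1) = (((pre ++ [(o w).getD w]).length : Nat) : Int) := by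
      simp
    rw [hlen, ih (pre ++ [(o w).getD w])]
    simp

theorem pv_fold_eq_map {β : Type} (o : β → Option β) (ws : List β) :
    (PySem.List.enumerate ws).foldl (pvStepO o) ws = ws.map (fun w => (o w).getD w) := by
  have h := pv_foldl_stepO o ws []
  simpa using h

-- characterization of find.go for the single-character needle "/"
theorem pv_find_go : ∀ (l : List Char) (k : Nat),
    PySem.Chars.find.go ['/'] l k
      = if '/' ∈ l then ((k + (l.takeWhile (· ≠ '/')).length : Nat) : Int) else -1 := by
  intro l
  induction l with
  | nil => intro k; simp [PySem.Chars.find.go]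
  | cons c rest ih =>
    intro k
    by_cases hc : c = '/'
    · subst hc
      have hpre : ['/'].isPrefixOf ('/' :: rest) = true := by simp [List.isPrefixOf]
      simp [PySem.Chars.find.go, hpre, List.takeWhile]
    · have hpre : ['/'].isPrefixOf (c :: rest) = false := by
        simp only [List.isPrefixOf, Bool.and_eq_false_iff]
        left; simp; exact fun h => hc h.symm
      simp only [PySem.Chars.find.go, hpre, Bool.false_eq_true, if_false, ih (k + 1)]
      simp only [List.takeWhile, List.mem_cons, Ne.symm hc, false_or]
      by_cases hm : '/' ∈ rest
      · simp [hm, hc]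
        ring
      · simp [hm, hc]

theorem pv_find_char (l : List Char) :
    PySem.Chars.find l ['/'] = if '/' ∈ l then (((l.takeWhile (· ≠ '/')).length : Nat) : Int) else -1 := by
  unfold PySem.Chars.find
  rw [pv_find_go]
  simp

theorem pv_isIn_char (l : List Char) :
    PySem.Chars.isIn ['/'] l = decide ('/' ∈ l) := by
  unfold PySem.Chars.isIn
  rw [pv_find_char]
  by_cases h : '/' ∈ l <;> simp [h]

theorem pv_take_takeWhile {α : Type} (p : α → Bool) (l : List α) :
    l.take ((l.takeWhile p).length) = l.takeWhile p := by
  have h := List.takeWhile_prefix (l := l) (p := p)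
  exact (List.prefix_iff_eq_take.mp h).symm

-- per-word value of A's branch, closed form
theorem pv_word_A (mode : String) (w : List Char) :
    (if PySem.Str.isIn "/" (String.ofList w) then
       (if mode = "kem" then
          PySem.Str.slice (String.ofList w) none (some (PySem.Str.find (String.ofList w) "/"))
        else if mode = "dss" then
          PySem.Str.slice (String.ofList w) (some (PySem.Str.find (String.ofList w) "/" + 1)) none
        else String.ofList w)
     else String.ofList w) = String.ofList (pvF mode w) := by
  have h1 : ("/" : String).toList = ['/'] := by decide
  unfold pvF
  by_cases h : '/' ∈ w
  · rw [if_pos (by rw [PySem.Str.isIn_eq, h1, String.toList_ofList, pv_isIn_char]; simp [h]),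
        if_pos h]
    by_cases hk : mode = "kem"
    · subst hk
      simp only [reduceIte]
      rw [← String.toList_inj, PySem.Str.toList_slice, String.toList_ofList, String.toList_ofList]
      rw [PySem.Str.find_eq, h1, String.toList_ofList, pv_find_char, if_pos h]
      show PySem.List.slice _ none (some _) = _
      rw [PySem.List.slice_to_natCast]
      exact pv_take_takeWhile _ _
    · by_cases hd : mode = "dss"
      · subst hd
        simp only [String.reduceEq, reduceIte]
        rw [← String.toList_inj, PySem.Str.toList_slice, String.toList_ofList, String.toList_ofList]
        rw [PySem.Str.find_eq, h1, String.toList_ofList, pv_find_char, if_pos h]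
        show PySem.List.slice _ (some (((w.takeWhile (· ≠ '/')).length : Nat) + 1)) none = _
        rw [show ((((w.takeWhile (· ≠ '/')).length : Nat) : Int) + 1)
              = (((w.takeWhile (· ≠ '/')).length + 1 : Nat) : Int) from by push_cast; ring]
        rw [PySem.List.slice_from_natCast]
      · simp [hk, hd]
  · rw [if_neg (by rw [PySem.Str.isIn_eq, h1, String.toList_ofList, pv_isIn_char]; simp [h]),
        if_neg h]

-- A in closed form
theorem pvA_eq (text mode : String) (h : text ≠ "") :
    choose_option text mode
      = PySem.Str.join " " ((PySem.Chars.split₀ text.toList).map (fun w => String.ofList (pvF mode w))) := by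
  unfold choose_option
  rw [if_neg h]
  have hsplit : PySem.Str.split₀ text = (PySem.Chars.split₀ text.toList).map String.ofList := rfl
  have hstep : (fun (acc : List String) (p : Int × String) =>
      if PySem.Str.isIn "/" p.2 then
        if mode = "kem" then PySem.List.pySetD acc p.1 (PySem.Str.slice p.2 none (some (PySem.Str.find p.2 "/")))
        else if mode = "dss" then PySem.List.pySetD acc p.1 (PySem.Str.slice p.2 (some (PySem.Str.find p.2 "/" + 1)) none)
        else acc
      else acc)
      = pvStepO (fun w =>
          if PySem.Str.isIn "/" w then
            (if mode = "kem" then some (PySem.Str.slice w none (some (PySem.Str.find w "/")))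
             else if mode = "dss" then some (PySem.Str.slice w (some (PySem.Str.find w "/" + 1)) none)
             else none)
          else none) := by
    funext acc p
    unfold pvStepO
    by_cases h1 : PySem.Str.isIn "/" p.2 = true
    · by_cases hk : mode = "kem"
      · simp [h1, hk, -PySem.Str.isIn_eq]
      · by_cases hd : mode = "dss" <;> simp [h1, hk, hd, -PySem.Str.isIn_eq]
    · simp [h1, -PySem.Str.isIn_eq]
  simp only [hstep, pv_fold_eq_map, hsplit, List.map_map]
  congr 1
  refine List.map_congr_left ?_
  intro w _
  show _ = String.ofList (pvF mode w)
  rw [← pv_word_A mode w]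
  by_cases h1 : PySem.Str.isIn "/" (String.ofList w) = true
  · by_cases hk : mode = "kem"
    · simp [h1, hk, -PySem.Str.isIn_eq]
    · by_cases hd : mode = "dss" <;> simp [h1, hk, hd, -PySem.Str.isIn_eq]
  · simp [h1, -PySem.Str.isIn_eq]

-- ---------- split₀ = pvWords ----------
theorem pv_go_words : ∀ (l cur : List Char) (acc : List (List Char)),
    PySem.Chars.split₀.go l cur acc
      = acc.reverse ++ (if cur.isEmpty then pvWords l
          else (cur.reverse ++ l.takeWhile pvNonWs) :: pvWords (l.dropWhile pvNonWs)) := by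
  intro l
  induction l with
  | nil =>
    intro cur acc
    by_cases hc : cur.isEmpty <;> simp [PySem.Chars.split₀.go, hc, pvWords]
  | cons c rest ih =>
    intro cur acc
    by_cases hsp : PySem.Chars.isspace c = true
    · by_cases hc : cur.isEmpty = true
      · simp only [PySem.Chars.split₀.go, hsp, if_true, hc, ih]
        simp [pvWords, hsp]
      · simp only [PySem.Chars.split₀.go, hsp, if_true, hc, if_false, ih]
        simp only [List.isEmpty_nil, if_true, List.reverse_cons, List.reverse_append,
          List.reverse_reverse]
        simp [hc, List.takeWhile, List.dropWhile, pvNonWs, hsp, pvWords]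
    · simp only [PySem.Chars.split₀.go, hsp, Bool.false_eq_true, if_false, ih]
      have hcc : (c :: cur).isEmpty = false := by simp
      simp only [hcc, Bool.false_eq_true, if_false, List.reverse_cons]
      by_cases hc : cur.isEmpty = true
      · have : cur = [] := by simpa using hc
        subst this
        simp [pvWords, hsp, List.takeWhile, List.dropWhile, pvNonWs,
          Bool.of_not_eq_true hsp]
      · simp [hc, pvWords, hsp, List.takeWhile, List.dropWhile, pvNonWs]

theorem pv_split₀_eq_words (l : List Char) : PySem.Chars.split₀ l = pvWords l := by
  unfold PySem.Chars.split₀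
  rw [pv_go_words]
  simp

-- ---------- helpers about whole words ----------
theorem pv_tw_append (w l : List Char) (hw : ∀ c ∈ w, PySem.Chars.isspace c = false) :
    (w ++ l).takeWhile pvNonWs = w ++ l.takeWhile pvNonWs
      ∧ (w ++ l).dropWhile pvNonWs = l.dropWhile pvNonWs := by
  induction w with
  | nil => simp
  | cons c w ih =>
    have hc : pvNonWs c = true := by simp [pvNonWs, hw c (by simp)]
    have := ih (fun d hd => hw d (by simp [hd]))
    simp [List.takeWhile, List.dropWhile, hc, this.1, this.2]

theorem pv_words_word (w : List Char) (hw : w ≠ [])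
    (hnw : ∀ c ∈ w, PySem.Chars.isspace c = false) :
    pvWords w = [w] := by
  cases w with
  | nil => exact absurd rfl hw
  | cons d w' =>
    have hd : PySem.Chars.isspace d = false := hnw d (by simp)
    have h2 := pv_tw_append w' [] (fun c hc => hnw c (by simp [hc]))
    rw [pvWords]
    simp only [hd, Bool.false_eq_true, if_false]
    rw [show w' ++ ([] : List Char) = w' from by simp] at h2
    rw [h2.1, h2.2]
    simp [pvWords]

-- takeWhile (≠ '/') through the first slash
theorem pv_tw_slash (pre post : List Char) (hp : '/' ∉ pre) :
    (pre ++ '/' :: post).takeWhile (· ≠ '/') = pre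
      ∧ ((pre ++ '/' :: post).takeWhile (· ≠ '/')).length = pre.length := by
  have h : (pre ++ '/' :: post).takeWhile (· ≠ '/') = pre := by
    induction pre with
    | nil => simp
    | cons c p ih =>
      have hc : c ≠ '/' := fun h => hp (by simp [h])
      rw [List.cons_append, List.takeWhile_cons, ih (fun h => hp (by simp [h]))]
      simp [hc]
  exact ⟨h, by rw [h]⟩

-- the value Source B flushes for a completed word containing a slash
theorem pv_flush (mode : String) (pre post : List Char) (hp : '/' ∉ pre) :
    String.ofList (pvF mode (pre ++ '/' :: post))
      = (if mode = "kem" then String.ofList pre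
         else if mode = "dss" then String.ofList post
         else String.ofList pre ++ "/" ++ String.ofList post) := by
  have hin : '/' ∈ pre ++ '/' :: post := by simp
  have htw := pv_tw_slash pre post hp
  unfold pvF
  rw [if_pos hin, htw.1]
  by_cases hk : mode = "kem"
  · simp [hk]
  · by_cases hd : mode = "dss"
    · rw [if_neg hk, if_pos hd, if_neg hk, if_pos hd]
      rw [show pre ++ '/' :: post = (pre ++ ['/']) ++ post from by simp,
          show pre.length + 1 = (pre ++ ['/']).length from by simp]
      rw [List.drop_left]
    · rw [if_neg hk, if_neg hd, if_neg hk, if_neg hd]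
      rw [← String.toList_inj]
      simp

-- ---------- B's scan invariant ----------
theorem pvB_inv (mode : String) : ∀ (l : List Char) (out : List String) (pre post : List Char) (seen : Bool),
    (∀ c ∈ pre, PySem.Chars.isspace c = false) →
    (∀ c ∈ post, PySem.Chars.isspace c = false) →
    '/' ∉ pre → (seen = false → post = []) →
    ((l ++ [' ']).foldl (pvStepB mode) ⟨out, pre, post, seen⟩).out
      = out ++ (pvWords ((pre ++ if seen then '/' :: post else []) ++ l)).map
          (fun w => String.ofList (pvF mode w)) := by
  intro l
  induction l with
  | nil =>
    intro out pre post seen hpre hpost hp hs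
    have hsp : PySem.Chars.isspace ' ' = true := by decide
    cases seen with
    | false =>
      have : post = [] := hs rfl
      subst this
      by_cases hpe : pre = []
      · subst hpe
        simp [pvStepB, hsp, pvWords]
      · have hstep : pvStepB mode ⟨out, pre, [], false⟩ ' '
            = ⟨out ++ [String.ofList pre], [], [], false⟩ := by
          unfold pvStepB; simp [hsp, hpe]
        simp only [List.nil_append, List.foldl_cons, List.foldl_nil, hstep]
        rw [show ((pre ++ if (false : Bool) = true then '/' :: ([] : List Char) else []) ++ []) = pre from by simp]
        rw [pv_words_word pre hpe hpre]
        have hnp : '/' ∉ pre → pvF mode pre = pre := fun h => by simp [pvF, h]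
        simp [hnp hp]
    | true =>
      simp only [List.nil_append, List.foldl_cons, List.foldl_nil, pvStepB, hsp, if_true]
      have hword : pre ++ '/' :: post ≠ [] := by simp
      have hnw : ∀ c ∈ pre ++ '/' :: post, PySem.Chars.isspace c = false := by
        intro c hc
        rcases List.mem_append.mp hc with h | h
        · exact hpre c h
        · rcases List.mem_cons.mp h with h | h
          · subst h; decide
          · exact hpost c h
      rw [List.append_nil]
      rw [pv_words_word _ hword hnw]
      rw [List.map_cons, List.map_nil]
      rw [pv_flush mode pre post hp]
      by_cases hk : mode = "kem"
      · simp [hk]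
      · by_cases hd : mode = "dss" <;> simp [hk, hd]
  | cons c rest ih =>
    intro out pre post seen hpre hpost hp hs
    rw [List.cons_append, List.foldl_cons]
    by_cases hsp : PySem.Chars.isspace c = true
    · -- word boundary
      have hstep : pvStepB mode ⟨out, pre, post, seen⟩ c
          = ⟨out ++ (if seen then
                [if mode = "kem" then String.ofList pre
                 else if mode = "dss" then String.ofList post
                 else String.ofList pre ++ "/" ++ String.ofList post]
              else if pre ≠ [] then [String.ofList pre] else []), [], [], false⟩ := by
        unfold pvStepB
        rw [if_pos hsp]
        cases seen with
        | true =>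
          by_cases hk : mode = "kem"
          · simp [hk]
          · by_cases hd : mode = "dss" <;> simp [hk, hd]
        | false =>
          by_cases hpe : pre ≠ [] <;> simp [hpe]
      rw [hstep, ih _ [] [] false (by simp) (by simp) (by simp) (fun _ => rfl)]
      cases seen with
      | false =>
        have : post = [] := hs rfl
        subst this
        by_cases hpe : pre = []
        · subst hpe
          have hwr : pvWords (c :: rest) = pvWords rest := by rw [pvWords]; simp [hsp]
          rw [show ((([] : List Char) ++ if (false : Bool) = true then '/' :: ([] : List Char) else []) ++ c :: rest) = c :: rest from by simp]
          rw [hwr]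
          simp
        · have hwc : pvWords (pre ++ c :: rest) = pre :: pvWords rest := by
            cases pre with
            | nil => exact absurd rfl hpe
            | cons d w' =>
              have hd : PySem.Chars.isspace d = false := hpre d (by simp)
              have h2 := pv_tw_append w' (c :: rest) (fun x hx => hpre x (by simp [hx]))
              rw [List.cons_append, pvWords]
              simp only [hd, Bool.false_eq_true, if_false]
              rw [h2.1, h2.2]
              simp [List.takeWhile, List.dropWhile, pvNonWs, hsp, pvWords]
          have hnp : pvF mode pre = pre := by simp [pvF, hp]
          rw [show ((pre ++ if (false : Bool) = true then '/' :: ([] : List Char) else []) ++ c :: rest) = pre ++ c :: rest from by simp]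
          rw [hwc, List.map_cons]
          simp [hpe, hnp]
      | true =>
        have hpe : pre ++ '/' :: post ≠ [] := by simp
        have hnw : ∀ x ∈ pre ++ '/' :: post, PySem.Chars.isspace x = false := by
          intro x hx
          rcases List.mem_append.mp hx with h | h
          · exact hpre x h
          · rcases List.mem_cons.mp h with h | h
            · subst h; decide
            · exact hpost x h
        have hwc : pvWords ((pre ++ '/' :: post) ++ c :: rest)
            = (pre ++ '/' :: post) :: pvWords rest := by
          cases hpp : pre ++ '/' :: post with
          | nil => exact absurd hpp hpe
          | cons d w' =>
            have hd : PySem.Chars.isspace d = false := hnw d (by rw [hpp]; simp)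
            have h2 := pv_tw_append w' (c :: rest) (fun x hx => hnw x (by rw [hpp]; simp [hx]))
            rw [List.cons_append, pvWords]
            simp only [hd, Bool.false_eq_true, if_false]
            rw [h2.1, h2.2]
            simp [List.takeWhile, List.dropWhile, pvNonWs, hsp, pvWords]
        have hfl := pv_flush mode pre post hp
        rw [show ((pre ++ if (true : Bool) = true then '/' :: post else []) ++ c :: rest) = (pre ++ '/' :: post) ++ c :: rest from by simp]
        rw [hwc, List.map_cons, hfl]
        by_cases hk : mode = "kem"
        · simp [hk]
        · by_cases hd : mode = "dss" <;> simp [hk, hd]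
    · -- mid-word character
      cases seen with
      | true =>
        have hstep : pvStepB mode ⟨out, pre, post, true⟩ c = ⟨out, pre, post ++ [c], true⟩ := by
          unfold pvStepB; simp [hsp]
        rw [hstep, ih out pre (post ++ [c]) true hpre
          (by intro x hx
              rcases List.mem_append.mp hx with h | h
              · exact hpost x h
              · simp at h; subst h; exact Bool.of_not_eq_true hsp)
          hp (by simp)]
        congr 3
        simp
      | false =>
        have hp0 : post = [] := hs rfl
        subst hp0
        by_cases hc : c = '/'
        · subst hc
          have hstep : pvStepB mode ⟨out, pre, [], false⟩ '/' = ⟨out, pre, [], true⟩ := by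
            unfold pvStepB; simp [hsp]
          rw [hstep, ih out pre [] true hpre (by simp) hp (by simp)]
          congr 3
          simp
        · have hstep : pvStepB mode ⟨out, pre, [], false⟩ c = ⟨out, pre ++ [c], [], false⟩ := by
            unfold pvStepB; simp [hsp, hc]
          rw [hstep, ih out (pre ++ [c]) [] false
            (by intro x hx
                rcases List.mem_append.mp hx with h | h
                · exact hpre x h
                · simp at hx; rcases hx with h | h
                  · exact hpre x h
                  · subst h; exact Bool.of_not_eq_true hsp)
            (by simp) (by intro h
                          rcases List.mem_append.mp h with h | h
                          · exact hp h
                          · simp at h; exact hc h.symm)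
            (fun _ => rfl)]
          congr 3
          simp

-- B in closed form
theorem pvB_eq (text mode : String) (h : text ≠ "") :
    choose_option_alt text mode
      = PySem.Str.join " " ((pvWords text.toList).map (fun w => String.ofList (pvF mode w))) := by
  unfold choose_option_alt
  rw [if_neg h]
  show PySem.Str.join " " (((text ++ " ").toList.foldl (pvStepB mode) ⟨[], [], [], false⟩).out) = _
  have hto : (text ++ " ").toList = text.toList ++ [' '] := by
    simp
  rw [hto, pvB_inv mode text.toList [] [] [] false (by simp) (by simp) (by simp) (fun _ => rfl)]
  simp

-- ===== VERDICT (by name: the statement is the Claim_ definition above) =====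
theorem choose_option_spec : Claim_equal_choose_option := by
  intro text mode _
  unfold Spec_choose_option
  by_cases h : text = ""
  · simp [choose_option, choose_option_alt, h]
  · rw [pvA_eq text mode h, pvB_eq text mode h, pv_split₀_eq_words]
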